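-- pv_equiv track=rewrite | github.com/Khokhlakov/crypt | AlgBrauer.py | contar_ocurrencias_consecutivas
-- ===== SOURCE A (Python) =====
-- def contar_ocurrencias_consecutivas(posiciones_mapeadas):
--     ocurrencias_consecutivas = {}
--
--     for simbolo, posiciones in posiciones_mapeadas.items():
--         contador = 0
--         for i in range(len(posiciones) - 1):
--             if posiciones[i] == posiciones[i + 1]:
--                 contador += 1
--         ocurrencias_consecutivas[simbolo] = contador
--
--     return ocurrencias_consecutivas
-- ===== SOURCE B (Python) =====
-- from itertools import groupby
--
-- def contar_ocurrencias_consecutivas(posiciones_mapeadas):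
--     # count of consecutive equal neighbours = length minus number of maximal runs
--     return {simbolo: len(posiciones) - sum(1 for _ in groupby(posiciones))
--             for simbolo, posiciones in posiciones_mapeadas.items()}
-- ===== Notes on version B (the rewrite author's own statement) =====
-- stated objective: idiomatic
-- what changed: Replaces the index-by-index adjacent-equality loop with a dict comprehension that derives each count as len(posiciones) minus the number of maximal runs produced by itertools.groupby.
import Mathlib
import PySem

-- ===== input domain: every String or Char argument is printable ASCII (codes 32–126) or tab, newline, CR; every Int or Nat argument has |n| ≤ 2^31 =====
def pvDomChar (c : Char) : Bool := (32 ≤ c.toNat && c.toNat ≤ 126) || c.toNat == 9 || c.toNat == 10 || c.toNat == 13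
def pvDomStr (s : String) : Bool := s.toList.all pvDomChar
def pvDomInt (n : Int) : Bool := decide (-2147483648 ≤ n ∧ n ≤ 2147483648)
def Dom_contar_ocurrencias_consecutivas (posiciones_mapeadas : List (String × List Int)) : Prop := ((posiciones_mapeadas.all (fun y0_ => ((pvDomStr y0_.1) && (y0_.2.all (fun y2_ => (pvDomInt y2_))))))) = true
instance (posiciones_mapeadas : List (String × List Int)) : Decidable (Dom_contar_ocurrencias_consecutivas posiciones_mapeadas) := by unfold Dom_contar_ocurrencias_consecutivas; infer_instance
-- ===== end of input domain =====

-- B replaces A's index-by-index adjacent-equality loop by a run decomposition: the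
-- count for each symbol is length minus the number of maximal runs (itertools.groupby).


-- ===== PORT A =====
-- inner loop: `contador = 0; for i in range(len(posiciones)-1): if posiciones[i] == posiciones[i+1]: contador += 1`
-- (indices i and i+1 are always in range here, so pyGetD with default 0 is exact at every access)
def pvAdjLoop (posiciones : List Int) : Int :=
  (PySem.List.pyRange 0 ((posiciones.length : Int) - 1) 1).foldl
    (fun contador i =>
      if PySem.List.pyGetD posiciones i 0 = PySem.List.pyGetD posiciones (i + 1) 0 then
        contador + 1
      else contador) 0

def contar_ocurrencias_consecutivas (posiciones_mapeadas : List (String × List Int)) : List (String × Int) :=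
  (posiciones_mapeadas.foldl
    (fun ocurrencias_consecutivas sp =>
      PySem.Dict.insert ocurrencias_consecutivas sp.1 (pvAdjLoop sp.2))
    PySem.Dict.empty).items

-- ===== PORT B =====
-- number of maximal runs of equal elements: sum(1 for _ in groupby(posiciones))
def pvRuns : List Int → Int
  | [] => 0
  | [_] => 1
  | a :: b :: t => (if a = b then 0 else 1) + pvRuns (b :: t)

def contar_ocurrencias_consecutivas_alt (posiciones_mapeadas : List (String × List Int)) : List (String × Int) :=
  posiciones_mapeadas.map (fun sp => (sp.1, (sp.2.length : Int) - pvRuns sp.2))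

-- ===== PRECONDITION & SPEC =====
-- The Python parameter is a dict, whose association-list encoding always has pairwise-distinct
-- keys; Pre_ admits exactly those lists (no actual Python input is excluded).
def Pre_contar_ocurrencias_consecutivas (posiciones_mapeadas : List (String × List Int)) : Prop :=
  (posiciones_mapeadas.map (·.1)).Nodup
instance (posiciones_mapeadas : List (String × List Int)) : Decidable (Pre_contar_ocurrencias_consecutivas posiciones_mapeadas) := by unfold Pre_contar_ocurrencias_consecutivas; infer_instance

def pvWitness_contar_ocurrencias_consecutivas : (List (String × List Int)) :=
  [("a", [1, 1, 2]), ("b", [])]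

def Spec_contar_ocurrencias_consecutivas (posiciones_mapeadas : List (String × List Int)) (out : List (String × Int)) : Prop := out = contar_ocurrencias_consecutivas_alt posiciones_mapeadas
instance (posiciones_mapeadas : List (String × List Int)) (out : List (String × Int)) : Decidable (Spec_contar_ocurrencias_consecutivas posiciones_mapeadas out) := by unfold Spec_contar_ocurrencias_consecutivas; infer_instance

-- ===== CLAIM (what is proved, stated in full; the proofs are below) =====
def Claim_equal_contar_ocurrencias_consecutivas : Prop := ∀ (posiciones_mapeadas : List (String × List Int)), Dom_contar_ocurrencias_consecutivas posiciones_mapeadas → Pre_contar_ocurrencias_consecutivas posiciones_mapeadas → Spec_contar_ocurrencias_consecutivas posiciones_mapeadas (contar_ocurrencias_consecutivas posiciones_mapeadas)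

-- ===== LEMMAS AND PROOFS =====

-- A's adjacency count, written structurally
def pvAdjRec : List Int → Int
  | a :: b :: t => (if a = b then 1 else 0) + pvAdjRec (b :: t)
  | _ => 0

theorem pvAdjLoop_eq_rec_aux : ∀ (ps : List Int) (c : Int),
    (PySem.List.pyRange 0 ((ps.length : Int) - 1) 1).foldl
      (fun contador i =>
        if PySem.List.pyGetD ps i 0 = PySem.List.pyGetD ps (i + 1) 0 then contador + 1
        else contador) c = c + pvAdjRec ps := by
  intro ps
  induction ps with
  | nil =>
      intro c
      rw [PySem.List.pyRange_one_eq_nil (by simp)]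
      simp [pvAdjRec]
  | cons a t ih =>
      intro c
      match t with
      | [] =>
          rw [PySem.List.pyRange_one_eq_nil (by simp)]
          simp [pvAdjRec]
      | b :: t' =>
          rw [PySem.List.pyRange_one_cons (by simp only [List.length_cons]; push_cast; omega), List.foldl_cons]
          have hshift :
              (PySem.List.pyRange (0 + 1) (((a :: b :: t').length : Int) - 1) 1).foldl
                (fun contador i =>
                  if PySem.List.pyGetD (a :: b :: t') i 0 =
                      PySem.List.pyGetD (a :: b :: t') (i + 1) 0 then contador + 1
                  else contador)
                (if PySem.List.pyGetD (a :: b :: t') 0 0 =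
                    PySem.List.pyGetD (a :: b :: t') (0 + 1) 0 then c + 1 else c)
              = (PySem.List.pyRange 0 (((b :: t').length : Int) - 1) 1).foldl
                (fun contador i =>
                  if PySem.List.pyGetD (b :: t') i 0 =
                      PySem.List.pyGetD (b :: t') (i + 1) 0 then contador + 1
                  else contador)
                (if a = b then c + 1 else c) := by
            rw [PySem.List.pyRange_one, PySem.List.pyRange_one]
            have h1 : (((a :: b :: t').length : Int) - 1 - (0 + 1)).toNat = t'.length := by
              simp only [List.length_cons]; push_cast; omega
            have h2 : (((b :: t').length : Int) - 1 - 0).toNat = t'.length := by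
              simp only [List.length_cons]; push_cast; omega
            rw [h1, h2, List.foldl_map, List.foldl_map]
            have hstart : (if PySem.List.pyGetD (a :: b :: t') 0 0 =
                PySem.List.pyGetD (a :: b :: t') (0 + 1) 0 then c + 1 else c)
                = (if a = b then c + 1 else c) := by
              simp [PySem.List.pyGetD_ofNat']
            rw [hstart]
            apply PySem.List.foldl_congr_mem
            intro acc k _
            have e1 : (0 : Int) + 1 + (k : Int) = ((k + 1 : Nat) : Int) := by push_cast; ring
            have e2 : (0 : Int) + 1 + (k : Int) + 1 = ((k + 2 : Nat) : Int) := by push_cast; ring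
            have e3 : (0 : Int) + (k : Int) = ((k : Nat) : Int) := by ring
            have e4 : (0 : Int) + (k : Int) + 1 = ((k + 1 : Nat) : Int) := by push_cast; ring
            rw [e2, e1, e4, e3,
              PySem.List.pyGetD_natCast, PySem.List.pyGetD_natCast,
              PySem.List.pyGetD_natCast, PySem.List.pyGetD_natCast]
            simp
          rw [hshift, ih]
          simp only [pvAdjRec]
          split_ifs <;> ring

theorem pvAdjRec_eq_sub : ∀ (ps : List Int), pvAdjRec ps = (ps.length : Int) - pvRuns ps := by
  intro ps
  induction ps with
  | nil => simp [pvAdjRec, pvRuns]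
  | cons a t ih =>
      match t with
      | [] => simp [pvAdjRec, pvRuns]
      | b :: t' =>
          simp only [pvAdjRec, pvRuns] at *
          split_ifs with h <;> (simp only [List.length_cons] at *; push_cast at *; omega)

theorem pvAdjLoop_eq (ps : List Int) : pvAdjLoop ps = (ps.length : Int) - pvRuns ps := by
  unfold pvAdjLoop
  rw [pvAdjLoop_eq_rec_aux, pvAdjRec_eq_sub]
  ring

-- ===== VERDICT (by name: the statement is the Claim_ definition above) =====
theorem contar_ocurrencias_consecutivas_spec : Claim_equal_contar_ocurrencias_consecutivas := by
  intro pm _ hpre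
  unfold Spec_contar_ocurrencias_consecutivas contar_ocurrencias_consecutivas
  rw [PySem.Dict.items_foldl_insert_fresh pm (fun sp => sp.1)
      (fun sp => pvAdjLoop sp.2) PySem.Dict.empty (by intro a _; simp) hpre]
  unfold contar_ocurrencias_consecutivas_alt
  simp [pvAdjLoop_eq, PySem.Dict.empty]
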